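-- pv_equiv track=rewrite | github.com/ansible/ansible | lib/ansible/module_utils/network/iosxr/config/l3_interfaces/l3_interfaces.py | verify_diff_again
-- ===== SOURCE A (Python) =====
-- def verify_diff_again(want, have):
--     """
--     Verify the IPV4 difference again as sometimes due to
--     change in order of set, set difference may result into change,
--     when there's actually no difference between want and have
--     :param want: want_dict IPV4
--     :param have: have_dict IPV4
--     :return: diff
--     """
--     diff = False
--     for each in want:
--         each_want = dict(each)
--         for every in have:
--             every_have = dict(every)
--             if each_want.get('address') != every_have.get('address') and \
--                     each_want.get('secondary') != every_have.get('secondary') and \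
--                     len(each_want.keys()) == len(every_have.keys()):
--                 diff = True
--                 break
--             elif each_want.get('address') != every_have.get('address') and len(each_want.keys()) == len(
--                     every_have.keys()):
--                 diff = True
--                 break
--         if diff:
--             break
--
--     return diff
-- ===== SOURCE B (Python) =====
-- def verify_diff_again(want, have):
--     """
--     Same result as the original O(n*m) double scan: True iff some want
--     entry has the same number of (distinct) keys as some have entry but
--     a different 'address'.  Index have once by key-count, then check
--     each want entry against the address set of its key-count group.
--     """
--     groups = {}
--     for every in have:
--         every_have = dict(every)
--         groups.setdefault(len(every_have), set()).add(every_have.get('address'))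
--     for each in want:
--         each_want = dict(each)
--         addrs = groups.get(len(each_want))
--         if addrs and (len(addrs) > 1 or each_want.get('address') not in addrs):
--             return True
--     return False
-- ===== Notes on version B (the rewrite author's own statement) =====
-- stated objective: faster
-- what changed: Replaced A's nested want×have scan by a single indexing pass that groups have entries by key-count into sets of addresses, then one pass over want checking each entry against its key-count group (an entry hits iff the group is non-empty and contains an address other than its own).
import Mathlib
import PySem

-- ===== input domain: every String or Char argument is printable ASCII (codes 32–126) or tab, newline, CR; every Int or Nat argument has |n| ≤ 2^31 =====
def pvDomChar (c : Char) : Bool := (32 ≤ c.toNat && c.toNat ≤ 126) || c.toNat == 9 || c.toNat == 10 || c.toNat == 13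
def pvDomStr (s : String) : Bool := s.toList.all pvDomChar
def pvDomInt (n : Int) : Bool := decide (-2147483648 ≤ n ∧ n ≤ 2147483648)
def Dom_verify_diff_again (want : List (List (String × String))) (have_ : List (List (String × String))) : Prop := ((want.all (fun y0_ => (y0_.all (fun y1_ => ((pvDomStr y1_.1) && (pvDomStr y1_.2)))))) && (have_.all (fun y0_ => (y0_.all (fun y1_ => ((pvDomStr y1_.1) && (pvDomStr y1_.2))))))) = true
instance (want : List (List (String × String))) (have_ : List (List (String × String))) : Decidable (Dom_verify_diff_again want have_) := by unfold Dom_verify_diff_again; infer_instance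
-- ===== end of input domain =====

-- B replaces A's O(n·m) double scan by indexing `have` once by key-count into address sets,
-- then a single pass over `want` (objective: faster, asymptotic). Return value only; neither mutates.

-- shared helper: Python's dict(pairs)
def pyDictOf (xs : List (String × String)) : PySem.Dict String String :=
  xs.foldl (fun d p => d.insert p.1 p.2) PySem.Dict.empty

-- ===== PORT A =====
-- inner `for every in have:` loop with its two break conditions
def aInner (each_want : PySem.Dict String String) : List (List (String × String)) → Bool
  | [] => false
  | every :: rest =>
    let every_have := pyDictOf every
    if each_want.get? "address" ≠ every_have.get? "address" ∧
       each_want.get? "secondary" ≠ every_have.get? "secondary" ∧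
       each_want.keys.length = every_have.keys.length then true
    else if each_want.get? "address" ≠ every_have.get? "address" ∧
            each_want.keys.length = every_have.keys.length then true
    else aInner each_want rest

def verify_diff_again (want : List (List (String × String))) (have_ : List (List (String × String))) : Bool :=
  match want with
  | [] => false
  | each :: rest =>
    let each_want := pyDictOf each
    if aInner each_want have_ then true else verify_diff_again rest have_

-- ===== PORT B =====
-- groups.setdefault(len(d), set()).add(d.get('address'))
def bGroups (have_ : List (List (String × String))) : PySem.Dict Nat (PySem.Set (Option String)) :=
  have_.foldl (fun g every =>
    let every_have := pyDictOf every
    g.modify every_have.keys.length PySem.Set.empty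
      (fun s => PySem.Set.add s (every_have.get? "address"))) PySem.Dict.empty

-- the single pass over want, returning on the first hit
def bScan (g : PySem.Dict Nat (PySem.Set (Option String))) : List (List (String × String)) → Bool
  | [] => false
  | each :: rest =>
    let each_want := pyDictOf each
    match g.get? each_want.keys.length with
    | none => bScan g rest
    | some addrs =>
      if addrs ≠ [] ∧ (1 < addrs.length ∨ each_want.get? "address" ∉ addrs) then true
      else bScan g rest

def verify_diff_again_alt (want : List (List (String × String))) (have_ : List (List (String × String))) : Bool :=
  bScan (bGroups have_) want

-- ===== PRECONDITION & SPEC =====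
def Spec_verify_diff_again (want : List (List (String × String))) (have_ : List (List (String × String))) (out : Bool) : Prop := out = verify_diff_again_alt want have_
instance (want : List (List (String × String))) (have_ : List (List (String × String))) (out : Bool) : Decidable (Spec_verify_diff_again want have_ out) := by unfold Spec_verify_diff_again; infer_instance

-- ===== CLAIM (what is proved, stated in full; the proofs are below) =====
def Claim_equal_verify_diff_again : Prop := ∀ (want : List (List (String × String))) (have_ : List (List (String × String))), Dom_verify_diff_again want have_ → Spec_verify_diff_again want have_ (verify_diff_again want have_)

-- ===== LEMMAS AND PROOFS =====

-- abbreviations for the two quantities both programs compare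
def pvKlen (h : List (String × String)) : Nat := (pyDictOf h).keys.length
def pvAddr (h : List (String × String)) : Option String := (pyDictOf h).get? "address"

-- the condition on which A's inner loop breaks (the two branches jointly), as a Bool
def pvHitB (e h : List (String × String)) : Bool :=
  decide (pvAddr e ≠ pvAddr h) && decide (pvKlen e = pvKlen h)

lemma aInner_eq_any (e : List (String × String)) (hs : List (List (String × String))) :
    aInner (pyDictOf e) hs = hs.any (pvHitB e) := by
  induction hs with
  | nil => rfl
  | cons h t ih =>
    simp only [aInner, List.any_cons, ← ih, pvHitB, pvAddr, pvKlen]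
    split_ifs with h1 h2 <;> simp_all
  
lemma verify_eq_any (want have_ : List (List (String × String))) :
    verify_diff_again want have_ = want.any (fun e => have_.any (pvHitB e)) := by
  induction want with
  | nil => rfl
  | cons e rest ih =>
    simp only [verify_diff_again, aInner_eq_any, List.any_cons, ← ih]
    split_ifs with h <;> simp [h]

-- B's per-want-entry condition, as a Bool
def bCond (g : PySem.Dict Nat (PySem.Set (Option String))) (e : List (String × String)) : Bool :=
  match g.get? (pvKlen e) with
  | none => false
  | some addrs => decide (addrs ≠ [] ∧ (1 < addrs.length ∨ pvAddr e ∉ addrs))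

lemma bScan_eq_any (g : PySem.Dict Nat (PySem.Set (Option String)))
    (want : List (List (String × String))) :
    bScan g want = want.any (bCond g) := by
  induction want with
  | nil => rfl
  | cons e rest ih =>
    simp only [bScan, List.any_cons, ← ih, bCond, pvKlen, pvAddr]
    cases hgt : g.get? (pyDictOf e).keys.length with
    | none => simp
    | some addrs =>
      dsimp only
      split_ifs with hc <;> simp [hc]

-- invariant of B's grouping pass: the group at key-count n holds exactly the
-- addresses of the have-entries with that key-count, without duplicates
lemma bGroups_spec (hs : List (List (String × String))) (n : Nat) :
    (((bGroups hs).getD n PySem.Set.empty).Nodup) ∧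
    ((bGroups hs).get? n = none ↔ ∀ h ∈ hs, pvKlen h ≠ n) ∧
    ((bGroups hs).getD n PySem.Set.empty = [] ↔ ∀ h ∈ hs, pvKlen h ≠ n) ∧
    (∀ x, x ∈ (bGroups hs).getD n PySem.Set.empty ↔ ∃ h ∈ hs, pvKlen h = n ∧ pvAddr h = x) := by
  induction hs using List.reverseRecOn with
  | nil =>
    simp [bGroups, PySem.Dict.get?_empty, PySem.Dict.getD_empty, PySem.Set.empty]
  | append_singleton hs h ih =>
    obtain ⟨ihnd, ihnone, ihempty, ihmem⟩ := ih
    have hstep : bGroups (hs ++ [h]) =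
        (bGroups hs).modify (pvKlen h) PySem.Set.empty
          (fun s => PySem.Set.add s (pvAddr h)) := by
      simp [bGroups, List.foldl_append, pvKlen, pvAddr]
    rw [hstep]
    by_cases hk : n = pvKlen h
    · subst hk
      rw [PySem.Dict.getD_modify]
      simp only [if_true]
      have hadd_ne : (((bGroups hs).getD (pvKlen h) PySem.Set.empty).add (pvAddr h)) ≠ [] := by
        rw [PySem.Set.add_eq_ite]
        split_ifs with hmem
        · intro hnil; rw [hnil] at hmem; simp at hmem
        · simp
      refine ⟨PySem.Set.nodup_add _ _ ihnd, ?_, ?_, ?_⟩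
      · rw [PySem.Dict.get?_eq_none_iff_contains, PySem.Dict.contains_modify]
        simp only [BEq.rfl, Bool.true_or]
        constructor
        · intro hf; simp at hf
        · intro hall; exact absurd rfl (hall h (by simp))
      · constructor
        · intro hnil; exact absurd hnil hadd_ne
        · intro hall; exact absurd rfl (hall h (by simp))
      · intro x
        rw [PySem.Set.mem_add, ihmem x]
        constructor
        · rintro (⟨h', hh', hkl, had⟩ | hx)
          · exact ⟨h', by simp [hh'], hkl, had⟩
          · exact ⟨h, by simp, rfl, hx.symm⟩
        · rintro ⟨h', hh', hkl, had⟩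
          rcases List.mem_append.mp hh' with hh' | hh'
          · exact Or.inl ⟨h', hh', hkl, had⟩
          · simp only [List.mem_singleton] at hh'
            subst hh'; exact Or.inr had.symm
    · rw [PySem.Dict.getD_modify]
      simp only [if_neg hk]
      refine ⟨ihnd, ?_, ?_, ?_⟩
      · rw [PySem.Dict.get?_eq_none_iff_contains, PySem.Dict.contains_modify]
        have : (n == pvKlen h) = false := by simp [hk]
        rw [this, Bool.false_or, ← PySem.Dict.get?_eq_none_iff_contains, ihnone]
        constructor
        · intro hall h' hh'
          rcases List.mem_append.mp hh' with hh' | hh'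
          · exact hall h' hh'
          · simp only [List.mem_singleton] at hh'; subst hh'
            exact fun c => hk c.symm
        · intro hall h' hh'; exact hall h' (List.mem_append_left _ hh')
      · rw [ihempty]
        constructor
        · intro hall h' hh'
          rcases List.mem_append.mp hh' with hh' | hh'
          · exact hall h' hh'
          · simp only [List.mem_singleton] at hh'; subst hh'
            exact fun c => hk c.symm
        · intro hall h' hh'; exact hall h' (List.mem_append_left _ hh')
      · intro x
        rw [ihmem x]
        constructor
        · rintro ⟨h', hh', hkl, had⟩; exact ⟨h', List.mem_append_left _ hh', hkl, had⟩
        · rintro ⟨h', hh', hkl, had⟩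
          rcases List.mem_append.mp hh' with hh' | hh'
          · exact ⟨h', hh', hkl, had⟩
          · simp only [List.mem_singleton] at hh'; subst hh'
            exact absurd hkl (fun c => hk c.symm)

-- a Nodup, nonempty list has an element ≠ a iff it has > 1 elements or a is not in it
lemma set_has_other {α : Type} [DecidableEq α] (s : List α) (a : α)
    (hnd : s.Nodup) (hne : s ≠ []) :
    (1 < s.length ∨ a ∉ s) ↔ ∃ x ∈ s, x ≠ a := by
  constructor
  · rintro (hlen | hnotin)
    · rcases s with _ | ⟨x, _ | ⟨y, t⟩⟩
      · simp at hlen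
      · simp at hlen
      · by_cases hxa : x = a
        · refine ⟨y, by simp, fun hya => ?_⟩
          have : x ≠ y := by simp [List.nodup_cons] at hnd; tauto
          exact this (by rw [hxa, hya])
        · exact ⟨x, by simp, hxa⟩
    · rcases s with _ | ⟨x, t⟩
      · exact absurd rfl hne
      · exact ⟨x, by simp, fun hxa => hnotin (by simp [hxa])⟩
  · rintro ⟨x, hx, hxa⟩
    by_contra hcon
    push Not at hcon
    obtain ⟨hl, ha⟩ := hcon
    rcases s with _ | ⟨y, t⟩
    · simp at hx
    · have ht : t = [] := by
        cases t with
        | nil => rfl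
        | cons z zs => simp at hl
      subst ht
      simp only [List.mem_singleton] at hx ha
      exact hxa (hx.trans ha.symm)

-- pointwise: B's group lookup decides the same thing as A's inner scan
lemma bCond_eq (have_ : List (List (String × String))) (e : List (String × String)) :
    bCond (bGroups have_) e = have_.any (pvHitB e) := by
  obtain ⟨hnd, hnone, hempty, hmem⟩ := bGroups_spec have_ (pvKlen e)
  rw [Bool.eq_iff_iff]
  simp only [bCond, List.any_eq_true, pvHitB, Bool.and_eq_true, decide_eq_true_eq]
  cases hgt : (bGroups have_).get? (pvKlen e) with
  | none =>
    have hno := hnone.mp hgt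
    constructor
    · intro hf; simp at hf
    · rintro ⟨h, hh, -, hkl⟩; exact absurd hkl.symm (hno h hh)
  | some addrs =>
    have haddrs : (bGroups have_).getD (pvKlen e) PySem.Set.empty = addrs := by
      rw [PySem.Dict.getD_eq_get?_getD, hgt]; rfl
    rw [haddrs] at hnd hempty hmem
    have hne : addrs ≠ [] := by
      intro hnil
      have := hnone.mpr (hempty.mp hnil)
      rw [hgt] at this; simp at this
    rw [decide_eq_true_eq]
    constructor
    · rintro ⟨-, hor⟩
      obtain ⟨x, hx, hxa⟩ := (set_has_other addrs (pvAddr e) hnd hne).mp hor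
      obtain ⟨h, hh, hkl, had⟩ := (hmem x).mp hx
      have hha : pvAddr h ≠ pvAddr e := had ▸ hxa
      exact ⟨h, hh, fun c => hha c.symm, hkl.symm⟩
    · rintro ⟨h, hh, hane, hkl⟩
      refine ⟨hne, (set_has_other addrs (pvAddr e) hnd hne).mpr
        ⟨pvAddr h, (hmem _).mpr ⟨h, hh, hkl.symm, rfl⟩, fun c => hane c.symm⟩⟩

-- ===== VERDICT (by name: the statement is the Claim_ definition above) =====
theorem verify_diff_again_spec : Claim_equal_verify_diff_again := by
  intro want have_ _
  unfold Spec_verify_diff_again verify_diff_again_alt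
  rw [verify_eq_any, bScan_eq_any]
  exact List.any_congr rfl (fun e => (bCond_eq have_ e).symm)
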